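-- pv_equiv track=rewrite | github.com/plastic-phy/plastic | plastic/phylogeny/generic/not_specified_run.py | create_command
-- ===== SOURCE A (Python) =====
-- def create_command(parameters, matrix, cells, mutations, matrix_file_path, cells_file_path,
--                    mutations_file_path) -> list[list[str]]:
--     final_commands = []
--     for command in parameters:
--         internal_command = []
--         for e in command:
--             if e == matrix:
--                 internal_command.append(matrix_file_path)
--             elif cells is not None and e == cells:
--                 internal_command.append(cells_file_path)
--             elif mutations is not None and e == mutations:
--                 internal_command.append(mutations_file_path)
--             else:
--                 internal_command.append(e)
--         final_commands.append(internal_command)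
--     return final_commands
-- ===== SOURCE B (Python) =====
-- def create_command(parameters, matrix, cells, mutations, matrix_file_path, cells_file_path,
--                    mutations_file_path) -> list[list[str]]:
--     # Inverted loop order: one marking pass over the whole grid per substitution rule,
--     # recording decided positions in an Option grid, then a finalize pass.
--     rules = [(matrix, matrix_file_path)]
--     if cells is not None:
--         rules.append((cells, cells_file_path))
--     if mutations is not None:
--         rules.append((mutations, mutations_file_path))
--     marks = [[None] * len(cmd) for cmd in parameters]
--     for v, p in rules:
--         for cmd, row in zip(parameters, marks):
--             for j, e in enumerate(cmd):
--                 if row[j] is None and e == v: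
--                     row[j] = p
--     return [[r if r is not None else e for e, r in zip(cmd, row)]
--             for cmd, row in zip(parameters, marks)]
-- ===== Notes on version B (the rewrite author's own statement) =====
-- stated objective: alternative
-- what changed: Inverts the loop nesting: instead of trying each placeholder per element inside one pass, B makes one marking sweep over the whole command grid per substitution rule, recording decided positions in a parallel Option grid (earlier rules protect positions from later ones), then finalizes unmarked positions with the original element.
import Mathlib
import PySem

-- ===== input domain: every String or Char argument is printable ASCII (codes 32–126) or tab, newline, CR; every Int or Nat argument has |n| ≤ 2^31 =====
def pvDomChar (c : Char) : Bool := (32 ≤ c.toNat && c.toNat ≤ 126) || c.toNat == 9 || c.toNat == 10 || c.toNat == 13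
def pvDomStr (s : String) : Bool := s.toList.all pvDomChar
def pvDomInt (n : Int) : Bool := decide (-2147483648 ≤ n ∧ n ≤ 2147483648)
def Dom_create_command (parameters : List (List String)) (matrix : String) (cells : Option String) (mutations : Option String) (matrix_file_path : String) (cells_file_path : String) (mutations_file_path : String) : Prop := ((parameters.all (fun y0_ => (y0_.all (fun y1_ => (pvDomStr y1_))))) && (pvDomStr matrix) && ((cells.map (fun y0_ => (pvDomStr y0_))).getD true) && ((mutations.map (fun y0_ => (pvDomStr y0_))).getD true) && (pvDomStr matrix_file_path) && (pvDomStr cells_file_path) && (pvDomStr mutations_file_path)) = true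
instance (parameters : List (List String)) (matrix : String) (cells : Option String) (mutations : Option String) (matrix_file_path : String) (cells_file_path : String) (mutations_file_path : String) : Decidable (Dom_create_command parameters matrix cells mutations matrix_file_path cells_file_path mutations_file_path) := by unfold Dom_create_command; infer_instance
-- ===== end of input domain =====

-- B inverts the loop nesting of A: one marking sweep over the whole grid per substitution rule
-- into a parallel Option grid, then a finalize pass — an alternative decomposition, not faster.

-- ===== PORT A =====
-- transliteration of A: nested append loops with an if/elif chain per element
def create_command (parameters : List (List String)) (matrix : String) (cells : Option String) (mutations : Option String) (matrix_file_path : String) (cells_file_path : String) (mutations_file_path : String) : List (List String) :=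
  parameters.foldl (fun final_commands command =>
    final_commands ++ [command.foldl (fun internal_command e =>
      internal_command ++
        [if e = matrix then matrix_file_path
         else if cells ≠ none ∧ cells = some e then cells_file_path
         else if mutations ≠ none ∧ mutations = some e then mutations_file_path
         else e]) []]) []

-- ===== PORT B =====
-- one marking sweep of rule (v, p) over one row: mark undecided positions whose element equals v
def markRow (v p : String) (cmd : List String) (row : List (Option String)) : List (Option String) :=
  (cmd.zip row).map (fun er => if er.2 = none ∧ er.1 = v then some p else er.2)

def create_command_alt (parameters : List (List String)) (matrix : String) (cells : Option String) (mutations : Option String) (matrix_file_path : String) (cells_file_path : String) (mutations_file_path : String) : List (List String) :=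
  let rules := [(matrix, matrix_file_path)]
      ++ (match cells with | some c => [(c, cells_file_path)] | none => [])
      ++ (match mutations with | some m => [(m, mutations_file_path)] | none => [])
  let marks0 := parameters.map (fun cmd => cmd.map (fun _ => (none : Option String)))
  let marks := rules.foldl (fun marks vp =>
      (parameters.zip marks).map (fun cr => markRow vp.1 vp.2 cr.1 cr.2)) marks0
  (parameters.zip marks).map (fun cr => (cr.1.zip cr.2).map (fun er => er.2.getD er.1))

-- ===== PRECONDITION & SPEC =====
def Spec_create_command (parameters : List (List String)) (matrix : String) (cells : Option String) (mutations : Option String) (matrix_file_path : String) (cells_file_path : String) (mutations_file_path : String) (out : List (List String)) : Prop := out = create_command_alt parameters matrix cells mutations matrix_file_path cells_file_path mutations_file_path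
instance (parameters : List (List String)) (matrix : String) (cells : Option String) (mutations : Option String) (matrix_file_path : String) (cells_file_path : String) (mutations_file_path : String) (out : List (List String)) : Decidable (Spec_create_command parameters matrix cells mutations matrix_file_path cells_file_path mutations_file_path out) := by unfold Spec_create_command; infer_instance

-- ===== CLAIM (what is proved, stated in full; the proofs are below) =====
def Claim_equal_create_command : Prop := ∀ (parameters : List (List String)) (matrix : String) (cells : Option String) (mutations : Option String) (matrix_file_path : String) (cells_file_path : String) (mutations_file_path : String), Dom_create_command parameters matrix cells mutations matrix_file_path cells_file_path mutations_file_path → Spec_create_command parameters matrix cells mutations matrix_file_path cells_file_path mutations_file_path (create_command parameters matrix cells mutations matrix_file_path cells_file_path mutations_file_path)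

-- ===== LEMMAS AND PROOFS =====
theorem zip_map_same {α β : Type} (xs : List α) (g : α → β) :
    xs.zip (xs.map g) = xs.map (fun x => (x, g x)) := by
  induction xs with
  | nil => rfl
  | cons x xs ih => simp [ih]

theorem foldl_append_singleton_eq_map {α β : Type} (f : α → β) (xs : List α) (acc : List β) :
    xs.foldl (fun a x => a ++ [f x]) acc = acc ++ xs.map f := by
  induction xs generalizing acc with
  | nil => simp
  | cons x xs ih => simp [List.foldl, ih]

-- a marking sweep on a row of the form cmd.map g is again of that form
theorem markRow_map (v p : String) (cmd : List String) (g : String → Option String) :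
    markRow v p cmd (cmd.map g)
      = cmd.map (fun e => if g e = none ∧ e = v then some p else g e) := by
  simp [markRow, zip_map_same, List.map_map, Function.comp_def]

-- folding the rule sweeps over a row commutes to a per-element fold of the rules
theorem row_fold (rs : List (String × String)) (cmd : List String) (g : String → Option String) :
    rs.foldl (fun row vp => markRow vp.1 vp.2 cmd row) (cmd.map g)
      = cmd.map (fun e => rs.foldl (fun o vp => if o = none ∧ e = vp.1 then some vp.2 else o) (g e)) := by
  induction rs generalizing g with
  | nil => rfl
  | cons vp rs ih =>
      simp only [List.foldl_cons, markRow_map]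
      rw [ih]

-- the outer fold over rules commutes to a per-command fold
theorem outer_fold (rs : List (String × String)) (params : List (List String))
    (g : List String → List (Option String)) :
    rs.foldl (fun marks vp => (params.zip marks).map (fun cr => markRow vp.1 vp.2 cr.1 cr.2))
        (params.map g)
      = params.map (fun cmd => rs.foldl (fun row vp => markRow vp.1 vp.2 cmd row) (g cmd)) := by
  induction rs generalizing g with
  | nil => rfl
  | cons vp rs ih =>
      simp only [List.foldl_cons, zip_map_same, List.map_map, Function.comp_def]
      rw [ih (fun cmd => markRow vp.1 vp.2 cmd (g cmd))]

-- B as a nested map of a per-element function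
theorem alt_eq_map (parameters : List (List String)) (matrix : String) (cells mutations : Option String)
    (mfp cfp ufp : String) :
    create_command_alt parameters matrix cells mutations mfp cfp ufp
      = parameters.map (fun cmd => cmd.map (fun e =>
          (( [(matrix, mfp)]
            ++ (match cells with | some c => [(c, cfp)] | none => [])
            ++ (match mutations with | some m => [(m, ufp)] | none => [])).foldl
              (fun o vp => if o = none ∧ e = vp.1 then some vp.2 else o) none).getD e)) := by
  unfold create_command_alt
  dsimp only
  rw [outer_fold]
  simp only [zip_map_same, List.map_map, Function.comp_def]
  apply List.map_congr_left
  intro cmd _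
  rw [row_fold]
  simp [zip_map_same, List.map_map, Function.comp_def]

theorem elem_eq (matrix : String) (cells mutations : Option String)
    (mfp cfp ufp : String) (e : String) :
    (if e = matrix then mfp
     else if cells ≠ none ∧ cells = some e then cfp
     else if mutations ≠ none ∧ mutations = some e then ufp
     else e)
    = (( [(matrix, mfp)]
        ++ (match cells with | some c => [(c, cfp)] | none => [])
        ++ (match mutations with | some m => [(m, ufp)] | none => [])).foldl
          (fun o vp => if o = none ∧ e = vp.1 then some vp.2 else o) none).getD e := by
  cases cells <;> cases mutations <;>
    simp only [List.cons_append, List.nil_append, List.foldl_cons, List.foldl_nil] <;>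
    split_ifs <;> simp_all

-- ===== VERDICT (by name: the statement is the Claim_ definition above) =====
theorem create_command_spec : Claim_equal_create_command := by
  intro parameters matrix cells mutations mfp cfp ufp _
  unfold Spec_create_command
  rw [alt_eq_map]
  unfold create_command
  rw [foldl_append_singleton_eq_map]
  simp only [List.nil_append]
  apply List.map_congr_left
  intro cmd _
  rw [foldl_append_singleton_eq_map]
  simp only [List.nil_append]
  exact List.map_congr_left (fun e _ => elem_eq matrix cells mutations mfp cfp ufp e)
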